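-- pv_equiv track=rewrite | github.com/kill9command/PandaAGI | libs/gateway/pandora_loop.py | _extract_learnings
-- ===== SOURCE A (Python) =====
-- def _extract_learnings(result: dict) -> list[str]:
--     """
--     Extract learnings from task result.
--
--     Looks for patterns, conventions, or important discoveries
--     in the response that should inform subsequent tasks.
--     """
--     learnings = []
--     response = result.get("response", "")
--
--     # Look for explicit pattern mentions
--     # This is a simplified heuristic - could be enhanced with LLM extraction
--     lower_response = response.lower()
--
--     patterns_to_detect = [
--         ("uses ", "framework/library usage"),
--         ("pattern:", "design pattern"),
--         ("convention:", "coding convention"),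
--         ("located in ", "file location"),
--         ("configured in ", "configuration location"),
--     ]
--
--     for trigger, category in patterns_to_detect:
--         if trigger in lower_response:
--             # Find the sentence containing the trigger
--             sentences = response.split(". ")
--             for sentence in sentences:
--                 if trigger in sentence.lower() and len(sentence) < 200:
--                     learnings.append(sentence.strip())
--                     break
--
--     return learnings[:3]  # Limit to 3 learnings per task
-- ===== SOURCE B (Python) =====
-- def _extract_learnings(result: dict) -> list[str]:
--     """
--     Extract learnings from task result.
--
--     Single pass: split the response into sentences once, record for each
--     trigger the first short sentence containing it, then emit in trigger order.
--     """
--     patterns_to_detect = [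
--         ("uses ", "framework/library usage"),
--         ("pattern:", "design pattern"),
--         ("convention:", "coding convention"),
--         ("located in ", "file location"),
--         ("configured in ", "configuration location"),
--     ]
--     response = result.get("response", "")
--     found = {}
--     for sentence in response.split(". "):
--         for trigger, _category in patterns_to_detect:
--             if trigger not in found and trigger in sentence.lower() and len(sentence) < 200:
--                 found[trigger] = sentence.strip()
--     learnings = [found[trigger] for trigger, _category in patterns_to_detect if trigger in found]
--     return learnings[:3]
-- ===== Notes on version B (the rewrite author's own statement) =====
-- stated objective: alternative
-- what changed: B splits the response into sentences once and makes a single pass over them, recording per trigger the first short matching sentence in a dict, then emits in trigger order; A re-splits the response for every matched trigger and rescans the sentence list per trigger, guarded by a redundant whole-response substring test.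
import Mathlib
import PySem

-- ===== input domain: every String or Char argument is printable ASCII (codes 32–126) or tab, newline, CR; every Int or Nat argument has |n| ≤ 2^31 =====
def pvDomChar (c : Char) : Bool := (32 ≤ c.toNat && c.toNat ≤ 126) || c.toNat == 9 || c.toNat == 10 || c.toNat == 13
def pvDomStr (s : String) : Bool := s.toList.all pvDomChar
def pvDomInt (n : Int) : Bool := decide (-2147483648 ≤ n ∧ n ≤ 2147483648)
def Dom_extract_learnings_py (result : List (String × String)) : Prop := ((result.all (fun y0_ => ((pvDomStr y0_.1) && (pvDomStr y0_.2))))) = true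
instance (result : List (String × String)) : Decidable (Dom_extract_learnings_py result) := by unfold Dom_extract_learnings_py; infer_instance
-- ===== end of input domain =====

-- B splits the response into sentences ONCE and scans them in a single pass, storing per trigger
-- the first short matching sentence in a dict, then emits in trigger order; A rescans per trigger.

-- the trigger/category table both Pythons carry literally
def pvPatterns : List (String × String) :=
  [("uses ", "framework/library usage"),
   ("pattern:", "design pattern"),
   ("convention:", "coding convention"),
   ("located in ", "file location"),
   ("configured in ", "configuration location")]

-- ===== PORT A =====
-- A's inner 'for sentence in sentences: … append; break'
def pvLoopA (trigger : List Char) (sentences : List (List Char)) (learnings : List String) : List String :=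
  match sentences with
  | [] => learnings
  | s :: rest =>
    if PySem.Chars.isIn trigger (PySem.Chars.lower s) && decide (s.length < 200) then
      learnings ++ [String.ofList (PySem.Chars.strip s)]
    else pvLoopA trigger rest learnings

def extract_learnings_py (result : List (String × String)) : List String :=
  let response := (PySem.Dict.mk result).getD "response" ""
  let lower_response := PySem.Chars.lower response.toList
  let learnings := pvPatterns.foldl (fun learnings tc =>
    if PySem.Chars.isIn tc.1.toList lower_response then
      pvLoopA tc.1.toList (PySem.Chars.splitOn response.toList ". ".toList) learnings
    else learnings) []
  PySem.List.slice learnings none (some 3)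

-- ===== PORT B =====
-- B's inner 'for trigger, _category in patterns_to_detect: …' for one sentence
def pvStepB (s : List Char) (d : PySem.Dict (List Char) String) : PySem.Dict (List Char) String :=
  pvPatterns.foldl (fun d tc =>
    if !d.contains tc.1.toList && PySem.Chars.isIn tc.1.toList (PySem.Chars.lower s)
        && decide (s.length < 200) then
      d.insert tc.1.toList (String.ofList (PySem.Chars.strip s))
    else d) d

def extract_learnings_py_alt (result : List (String × String)) : List String :=
  let response := (PySem.Dict.mk result).getD "response" ""
  let found := (PySem.Chars.splitOn response.toList ". ".toList).foldl
      (fun d s => pvStepB s d) PySem.Dict.empty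
  let learnings := pvPatterns.foldl (fun acc tc =>
    if found.contains tc.1.toList then acc ++ [found.getD tc.1.toList ""] else acc) []
  PySem.List.slice learnings none (some 3)

-- ===== PRECONDITION & SPEC =====
def Spec_extract_learnings_py (result : List (String × String)) (out : List String) : Prop := out = extract_learnings_py_alt result
instance (result : List (String × String)) (out : List String) : Decidable (Spec_extract_learnings_py result out) := by unfold Spec_extract_learnings_py; infer_instance

-- ===== CLAIM (what is proved, stated in full; the proofs are below) =====
def Claim_equal_extract_learnings_py : Prop := ∀ (result : List (String × String)), Dom_extract_learnings_py result → Spec_extract_learnings_py result (extract_learnings_py result)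

-- ===== LEMMAS AND PROOFS =====

-- the first sentence matching a trigger (stripped), the common spec of both loops
def pvF (t : List Char) : List (List Char) → Option String
  | [] => none
  | s :: rest =>
    if PySem.Chars.isIn t (PySem.Chars.lower s) && decide (s.length < 200) then
      some (String.ofList (PySem.Chars.strip s))
    else pvF t rest

theorem pvLoopA_eq (t : List Char) (ss : List (List Char)) (acc : List String) :
    pvLoopA t ss acc = acc ++ (pvF t ss).toList := by
  induction ss generalizing acc with
  | nil => simp [pvLoopA, pvF]
  | cons s rest ih =>
    simp only [pvLoopA, pvF]
    split
    · simp
    · exact ih acc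

theorem pv_go_mem (sep : List Char) (fuel : Nat) :
    ∀ (l cur : List Char) (acc : List (List Char)) (x : List Char),
      x ∈ PySem.Chars.splitOn.go sep fuel l cur acc → x ∈ acc ∨ x <:+: cur.reverse ++ l := by
  induction fuel with
  | zero =>
    intro l cur acc x hx
    rw [PySem.Chars.splitOn.go.eq_def] at hx
    simp only [List.mem_reverse, List.mem_cons] at hx
    rcases hx with h | h
    · exact Or.inr (h ▸ List.infix_rfl)
    · exact Or.inl h
  | succ fuel ih =>
    intro l cur acc x hx
    cases l with
    | nil =>
      rw [PySem.Chars.splitOn.go.eq_def] at hx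
      simp only [List.mem_reverse, List.mem_cons] at hx
      rcases hx with h | h
      · exact Or.inr (h ▸ (List.prefix_append _ _).isInfix)
      · exact Or.inl h
    | cons c rest =>
      rw [PySem.Chars.splitOn.go.eq_def] at hx
      simp only at hx
      by_cases hp : sep.isPrefixOf (c :: rest) = true
      · rw [if_pos hp] at hx
        rcases ih _ _ _ _ hx with h | h
        · rcases List.mem_cons.mp h with h' | h'
          · exact Or.inr (h' ▸ (List.prefix_append _ _).isInfix)
          · exact Or.inl h'
        · refine Or.inr (h.trans ?_)
          simp only [List.reverse_nil, List.nil_append]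
          exact ((List.drop_suffix _ _).trans (List.suffix_append _ _)).isInfix
      · rw [if_neg hp] at hx
        rcases ih _ _ _ _ hx with h | h
        · exact Or.inl h
        · refine Or.inr ?_
          simpa using h
  
theorem pv_mem_splitOn_infix (s sep x : List Char) (hx : x ∈ PySem.Chars.splitOn s sep) :
    x <:+: s := by
  rcases pv_go_mem sep (s.length + 1) s [] [] x hx with h | h
  · simp at h
  · simpa using h

-- the outer 'trigger in lower_response' guard of A is redundant
theorem pv_guard_of_F (t : List Char) (r : List Char) (x : String)
    (h : pvF t (PySem.Chars.splitOn r ". ".toList) = some x) :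
    PySem.Chars.isIn t (PySem.Chars.lower r) = true := by
  have hmem : ∃ s ∈ PySem.Chars.splitOn r ". ".toList,
      PySem.Chars.isIn t (PySem.Chars.lower s) = true := by
    generalize hss : PySem.Chars.splitOn r ". ".toList = ss at h
    clear hss
    induction ss with
    | nil => simp [pvF] at h
    | cons s rest ih =>
      simp only [pvF] at h
      by_cases hc : (PySem.Chars.isIn t (PySem.Chars.lower s) && decide (s.length < 200)) = true
      · refine ⟨s, List.mem_cons_self, ?_⟩
        simp only [Bool.and_eq_true] at hc
        exact hc.1
      · rw [if_neg hc] at h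
        rcases ih h with ⟨s', hs', hm⟩
        exact ⟨s', List.mem_cons_of_mem _ hs', hm⟩
  rcases hmem with ⟨s, hs, hm⟩
  have hinf : s <:+: r := pv_mem_splitOn_infix r ". ".toList s hs
  have hlow : PySem.Chars.lower s <:+: PySem.Chars.lower r := by
    simpa [PySem.Chars.lower] using hinf.map PySem.Chars.lowerChar
  exact (PySem.Chars.isIn_iff_infix _ _).mpr
    (((PySem.Chars.isIn_iff_infix _ _).mp hm).trans hlow)

-- dict untouched on keys outside the trigger list
theorem pv_foldl_get?_not_mem (ts : List (String × String)) (s : List Char)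
    (d : PySem.Dict (List Char) String) (t : List Char)
    (ht : t ∉ ts.map (fun tc => tc.1.toList)) :
    (ts.foldl (fun d tc =>
      if !d.contains tc.1.toList && PySem.Chars.isIn tc.1.toList (PySem.Chars.lower s)
          && decide (s.length < 200) then
        d.insert tc.1.toList (String.ofList (PySem.Chars.strip s))
      else d) d).get? t = d.get? t := by
  induction ts generalizing d with
  | nil => rfl
  | cons tc rest ih =>
    simp only [List.map_cons, List.mem_cons, not_or] at ht
    simp only [List.foldl_cons]
    rw [ih _ (by exact ht.2)]
    split
    · rw [PySem.Dict.get?_insert]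
      rw [if_neg ht.1]
    · rfl

-- one sentence: the per-trigger effect of B's inner trigger loop
theorem pv_foldl_get?_mem (ts : List (String × String)) (s : List Char)
    (hnd : (ts.map (fun tc => tc.1.toList)).Nodup)
    (d : PySem.Dict (List Char) String) (t : List Char)
    (ht : t ∈ ts.map (fun tc => tc.1.toList)) :
    (ts.foldl (fun d tc =>
      if !d.contains tc.1.toList && PySem.Chars.isIn tc.1.toList (PySem.Chars.lower s)
          && decide (s.length < 200) then
        d.insert tc.1.toList (String.ofList (PySem.Chars.strip s))
      else d) d).get? t =
    (d.get? t).or (if PySem.Chars.isIn t (PySem.Chars.lower s) && decide (s.length < 200) then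
      some (String.ofList (PySem.Chars.strip s)) else none) := by
  induction ts generalizing d with
  | nil => simp at ht
  | cons tc rest ih =>
    simp only [List.map_cons, List.nodup_cons] at hnd
    simp only [List.map_cons, List.mem_cons] at ht
    simp only [List.foldl_cons]
    rcases ht with rfl | hmem
    · rw [pv_foldl_get?_not_mem rest s _ _ hnd.1]
      by_cases hc : (PySem.Chars.isIn tc.1.toList (PySem.Chars.lower s)
          && decide (s.length < 200)) = true
      · rw [if_pos hc]
        by_cases hd : d.contains tc.1.toList = true
        · rw [if_neg (by simp [hd])]
          rw [PySem.Dict.contains_eq_isSome_get?] at hd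
          rcases Option.isSome_iff_exists.mp hd with ⟨v, hv⟩
          simp [hv]
        · have hd' : d.contains tc.1.toList = false := by simpa using hd
          rw [if_pos (by simp [hd', hc])]
          have hnone : d.get? tc.1.toList = none := by
            rw [PySem.Dict.contains_eq_isSome_get?] at hd'
            cases h : d.get? tc.1.toList
            · rfl
            · rw [h] at hd'; simp at hd'
          simp [hnone, PySem.Dict.get?_insert_self]
      · rw [Bool.not_eq_true] at hc
        simp [Bool.and_assoc, hc]
    · rw [ih hnd.2 _ hmem]
      split
      · rw [PySem.Dict.get?_insert]
        rw [if_neg (show ¬ t = tc.1.toList from fun h => hnd.1 (h ▸ hmem))]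
      · rfl

-- the whole single pass: the dict holds exactly the first match per trigger
theorem pv_scan_get? (ss : List (List Char)) (d : PySem.Dict (List Char) String)
    (t : List Char) (ht : t ∈ pvPatterns.map (fun tc => tc.1.toList)) :
    (ss.foldl (fun d s => pvStepB s d) d).get? t = (d.get? t).or (pvF t ss) := by
  induction ss generalizing d with
  | nil => simp [pvF]
  | cons s rest ih =>
    simp only [List.foldl_cons]
    rw [ih (pvStepB s d)]
    have hnd : (pvPatterns.map (fun tc => tc.1.toList)).Nodup := by decide
    simp only [pvStepB]
    rw [pv_foldl_get?_mem pvPatterns s hnd d t ht]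
    rw [Option.or_assoc]
    congr 1
    simp only [pvF]
    split <;> simp

-- ===== VERDICT (by name: the statement is the Claim_ definition above) =====
theorem extract_learnings_py_spec : Claim_equal_extract_learnings_py := by
  intro result _
  unfold Spec_extract_learnings_py extract_learnings_py extract_learnings_py_alt
  simp only []
  set r := (PySem.Dict.mk result).getD "response" "" with hr
  set ss := PySem.Chars.splitOn r.toList ". ".toList with hss
  congr 1
  have hfound : ∀ t ∈ pvPatterns.map (fun tc => tc.1.toList),
      ((ss.foldl (fun d s => pvStepB s d) PySem.Dict.empty).get? t) = pvF t ss := by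
    intro t ht
    rw [pv_scan_get? ss PySem.Dict.empty t ht]
    simp
  have hA : pvPatterns.foldl (fun learnings tc =>
      if PySem.Chars.isIn tc.1.toList (PySem.Chars.lower r.toList) then
        pvLoopA tc.1.toList ss learnings
      else learnings) [] =
    pvPatterns.foldl (fun acc tc => acc ++ (pvF tc.1.toList ss).toList) [] := by
    apply PySem.List.foldl_congr_mem
    intro acc tc _
    by_cases hg : PySem.Chars.isIn tc.1.toList (PySem.Chars.lower r.toList) = true
    · rw [if_pos hg, pvLoopA_eq]
    · rw [if_neg hg]
      cases hF : pvF tc.1.toList ss with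
      | none => simp
      | some x => exact absurd (pv_guard_of_F tc.1.toList r.toList x (hss ▸ hF)) hg
  have hB : pvPatterns.foldl (fun acc tc =>
      if (ss.foldl (fun d s => pvStepB s d) PySem.Dict.empty).contains tc.1.toList then
        acc ++ [(ss.foldl (fun d s => pvStepB s d) PySem.Dict.empty).getD tc.1.toList ""]
      else acc) [] =
    pvPatterns.foldl (fun acc tc => acc ++ (pvF tc.1.toList ss).toList) [] := by
    apply PySem.List.foldl_congr_mem
    intro acc tc htc
    have hm : tc.1.toList ∈ pvPatterns.map (fun tc => tc.1.toList) :=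
      List.mem_map_of_mem htc
    rw [PySem.Dict.contains_eq_isSome_get?, hfound _ hm, PySem.Dict.getD_eq_get?_getD,
      hfound _ hm]
    cases hF : pvF tc.1.toList ss <;> simp
  rw [hA, hB]
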